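-- pv_equiv track=rewrite | github.com/DonghanPark/codetree-TILs | 250517/선두를 지켜라 3/keep-the-lead-3.py | count_switch_top
-- ===== SOURCE A (Python) =====
-- def set_top(a, b):
--     if a > b:
--         return 1
--     elif b > a:
--         return 2
--     else:
--         return 0
--
-- def count_switch_top(a_dist_info: list[int], b_dist_info: list[int]) -> int:
--     total_time = len(a_dist_info)
--     switch_count = 0
--     top = 0 # 0: draw, 1: A, 2: B
--     for i in range(total_time):
--         if top == 1 and a_dist_info[i] <= b_dist_info[i]:
--             switch_count += 1
--             top = set_top(a_dist_info[i], b_dist_info[i])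
--         elif top == 2 and a_dist_info[i] >= b_dist_info[i]:
--             switch_count += 1
--             top = set_top(a_dist_info[i], b_dist_info[i])
--         elif top == 0 and a_dist_info[i] != b_dist_info[i]:
--             switch_count += 1
--             top = set_top(a_dist_info[i], b_dist_info[i])
--
--     return switch_count
-- ===== SOURCE B (Python) =====
-- def count_switch_top(a_dist_info: list[int], b_dist_info: list[int]) -> int:
--     n = len(a_dist_info)
--     states = [0] + [
--         1 if a_dist_info[i] > b_dist_info[i] else 2 if b_dist_info[i] > a_dist_info[i] else 0
--         for i in range(n)
--     ]
--     # divide and conquer over the interval [lo, hi] of the state array: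
--     # the number of lead switches on an interval is the sum over its two halves.
--     def switches(lo, hi):
--         if hi - lo < 1:
--             return 0
--         if hi - lo == 1:
--             return 1 if states[lo] != states[hi] else 0
--         mid = (lo + hi) // 2
--         return switches(lo, mid) + switches(mid, hi)
--     return switches(0, n)
-- ===== Notes on version B (the rewrite author's own statement) =====
-- stated objective: alternative
-- what changed: Replaces A's fused left-to-right branch-on-`top` state machine with a divide-and-conquer: classify each instant into a lead state (with the initial draw state prepended), then recursively split the interval and sum the switch counts of the two halves.
import Mathlib
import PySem

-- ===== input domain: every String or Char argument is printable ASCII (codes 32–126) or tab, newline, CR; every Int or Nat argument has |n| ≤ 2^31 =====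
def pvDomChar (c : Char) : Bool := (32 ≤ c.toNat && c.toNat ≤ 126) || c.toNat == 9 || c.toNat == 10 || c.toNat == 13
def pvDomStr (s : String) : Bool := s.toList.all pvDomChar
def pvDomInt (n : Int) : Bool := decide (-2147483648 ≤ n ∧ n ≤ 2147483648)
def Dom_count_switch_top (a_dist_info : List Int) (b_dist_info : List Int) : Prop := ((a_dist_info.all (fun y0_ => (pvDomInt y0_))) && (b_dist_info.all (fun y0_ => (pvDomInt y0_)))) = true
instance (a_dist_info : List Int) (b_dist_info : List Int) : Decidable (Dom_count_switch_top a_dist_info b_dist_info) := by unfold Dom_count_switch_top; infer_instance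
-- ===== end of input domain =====

-- B replaces A's fused left-to-right branch-on-`top` state machine by a divide-and-conquer over the
-- classified state array (split the interval, sum halves); alternative decomposition, same cost.


-- ===== PORT A =====
def set_top (a : Int) (b : Int) : Int :=
  if a > b then 1 else if b > a then 2 else 0

def count_switch_top (a_dist_info : List Int) (b_dist_info : List Int) : Int :=
  let total_time : Int := (a_dist_info.length : Int)
  -- the loop state is (switch_count, top)
  ((PySem.List.pyRange 0 total_time 1).foldl (fun st i =>
    let ai := PySem.List.pyGetD a_dist_info i 0   -- a_dist_info[i]; in range under Pre_
    let bi := PySem.List.pyGetD b_dist_info i 0   -- b_dist_info[i]; in range under Pre_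
    if st.2 = 1 ∧ ai ≤ bi then (st.1 + 1, set_top ai bi)
    else if st.2 = 2 ∧ ai ≥ bi then (st.1 + 1, set_top ai bi)
    else if st.2 = 0 ∧ ai ≠ bi then (st.1 + 1, set_top ai bi)
    else st) ((0 : Int), (0 : Int))).1

-- ===== PORT B =====
-- inner helper `switches(lo, hi)`: divide and conquer on the interval [lo, hi] of the state array
-- (lo, hi are always nonnegative in B, so they are carried as Nat; (lo+hi)/2 on Nat = Python's //)
def pvSwitches (states : List Int) (lo hi : Nat) : Int :=
  if hi - lo < 1 then 0
  else if hi - lo = 1 then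
    (if PySem.List.pyGetD states (lo : Int) 0 ≠ PySem.List.pyGetD states (hi : Int) 0 then 1 else 0)
  else pvSwitches states lo ((lo + hi) / 2) + pvSwitches states ((lo + hi) / 2) hi
termination_by hi - lo
decreasing_by all_goals omega

def count_switch_top_alt (a_dist_info : List Int) (b_dist_info : List Int) : Int :=
  let n := a_dist_info.length
  let states : List Int :=
    0 :: (PySem.List.pyRange 0 (n : Int) 1).map (fun i =>
      let ai := PySem.List.pyGetD a_dist_info i 0   -- a_dist_info[i]; in range under Pre_
      let bi := PySem.List.pyGetD b_dist_info i 0   -- b_dist_info[i]; in range under Pre_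
      if ai > bi then 1 else if bi > ai then 2 else 0)
  pvSwitches states 0 n

-- ===== PRECONDITION & SPEC =====
-- Pre_ excludes exactly the inputs on which Python A raises IndexError: b_dist_info shorter than a_dist_info.
def Pre_count_switch_top (a_dist_info : List Int) (b_dist_info : List Int) : Prop :=
  a_dist_info.length ≤ b_dist_info.length
instance (a_dist_info : List Int) (b_dist_info : List Int) : Decidable (Pre_count_switch_top a_dist_info b_dist_info) := by unfold Pre_count_switch_top; infer_instance
def pvWitness_count_switch_top : List Int × List Int := ([3, 1, 2, 2], [1, 1, 5, 2])

def Spec_count_switch_top (a_dist_info : List Int) (b_dist_info : List Int) (out : Int) : Prop := out = count_switch_top_alt a_dist_info b_dist_info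
instance (a_dist_info : List Int) (b_dist_info : List Int) (out : Int) : Decidable (Spec_count_switch_top a_dist_info b_dist_info out) := by unfold Spec_count_switch_top; infer_instance

-- ===== CLAIM (what is proved, stated in full; the proofs are below) =====
def Claim_equal_count_switch_top : Prop := ∀ (a_dist_info : List Int) (b_dist_info : List Int), Dom_count_switch_top a_dist_info b_dist_info → Pre_count_switch_top a_dist_info b_dist_info → Spec_count_switch_top a_dist_info b_dist_info (count_switch_top a_dist_info b_dist_info)

-- ===== LEMMAS AND PROOFS =====

-- number of changes along a chain of states starting from `prev` (left-to-right reference count)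
def pvCountB (prev : Int) : List Int → Int
  | [] => 0
  | x :: t => (if x ≠ prev then 1 else 0) + pvCountB x t

-- adjacent-change count of the segment of `states` of length n starting at index lo
def pvSeg (states : List Int) (lo : Nat) : Nat → Int
  | 0 => 0
  | n + 1 =>
    (if PySem.List.pyGetD states (lo : Int) 0 ≠ PySem.List.pyGetD states ((lo + 1 : Nat) : Int) 0 then 1 else 0)
      + pvSeg states (lo + 1) n

theorem pvSeg_add (states : List Int) (m : Nat) : ∀ (lo n : Nat),
    pvSeg states lo (m + n) = pvSeg states lo m + pvSeg states (lo + m) n := by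
  induction m with
  | zero => intro lo n; simp [pvSeg]
  | succ k ih =>
    intro lo n
    have : k + 1 + n = (k + n) + 1 := by omega
    simp only [pvSeg, Nat.succ_add, ih (lo + 1) n]
    have h3 : lo + (k + 1) = 1 + lo + k := by omega
    rw [h3]
    have h4 : (lo + k).succ = 1 + lo + k := by omega
    rw [h4]
    ring

theorem pvSwitches_eq_seg (states : List Int) : ∀ (n lo : Nat),
    pvSwitches states lo (lo + n) = pvSeg states lo n := by
  intro n
  induction n using Nat.strong_induction_on with
  | _ n ih =>
    intro lo
    rw [pvSwitches]
    rcases Nat.lt_or_ge n 1 with h1 | h1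
    · interval_cases n
      simp [pvSeg]
    rcases Nat.lt_or_ge n 2 with h2 | h2
    · interval_cases n
      simp [pvSeg]
    · have hm : (lo + (lo + n)) / 2 = lo + n / 2 := by omega
      rw [if_neg (by omega), if_neg (by omega), hm]
      have hA : pvSwitches states lo (lo + n / 2) = pvSeg states lo (n / 2) :=
        ih (n / 2) (by omega) lo
      have hB : pvSwitches states (lo + n / 2) (lo + n) = pvSeg states (lo + n / 2) (n - n / 2) := by
        have e : lo + n = (lo + n / 2) + (n - n / 2) := by omega
        rw [e]; exact ih (n - n / 2) (by omega) _
      rw [hA, hB]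
      have h := (pvSeg_add states (n / 2) lo (n - n / 2)).symm
      have e : n / 2 + (n - n / 2) = n := by omega
      rw [e] at h
      exact h

-- pvSeg over an explicit list equals the left-to-right count pvCountB
theorem pvSeg_eq_countB : ∀ (l : List Int) (pre : List Int) (prev : Int),
    pvSeg (pre ++ prev :: l) pre.length l.length = pvCountB prev l := by
  intro l
  induction l with
  | nil => intro pre prev; simp [pvSeg, pvCountB]
  | cons x t ih =>
    intro pre prev
    have hget1 : PySem.List.pyGetD (pre ++ prev :: x :: t) ((pre.length : Nat) : Int) 0 = prev := by
      rw [PySem.List.pyGetD_natCast]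
      simp
    have hget2 : PySem.List.pyGetD (pre ++ prev :: x :: t) ((pre.length + 1 : Nat) : Int) 0 = x := by
      rw [PySem.List.pyGetD_natCast]
      have : pre ++ prev :: x :: t = (pre ++ [prev]) ++ x :: t := by simp
      rw [this]
      have hl : pre.length + 1 = (pre ++ [prev]).length := by simp
      rw [hl]
      simp
    simp only [List.length_cons, pvSeg, hget1, hget2, pvCountB]
    have hstep : pre ++ prev :: x :: t = (pre ++ [prev]) ++ x :: t := by simp
    have hl : pre.length + 1 = (pre ++ [prev]).length := by simp
    rw [hstep, hl, ih (pre ++ [prev]) x]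
    rcases eq_or_ne prev x with h | h
    · simp [h]
    · simp [h, Ne.symm h]

-- A's step, for top ∈ {0,1,2}, is exactly "switch iff the classified state differs from top"
theorem pvStep (ai bi sc top : Int) (htop : top = 0 ∨ top = 1 ∨ top = 2) :
    (if top = 1 ∧ ai ≤ bi then (sc + 1, set_top ai bi)
     else if top = 2 ∧ ai ≥ bi then (sc + 1, set_top ai bi)
     else if top = 0 ∧ ai ≠ bi then (sc + 1, set_top ai bi)
     else (sc, top))
    = (if (if ai > bi then 1 else if bi > ai then 2 else 0) ≠ top
        then (sc + 1, (if ai > bi then (1:Int) else if bi > ai then 2 else 0))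
        else (sc, top)) := by
  unfold set_top
  rcases htop with h | h | h <;> subst h <;> split_ifs <;> first | rfl | omega

theorem pvClassifyMem (ai bi : Int) :
    (if ai > bi then (1:Int) else if bi > ai then 2 else 0) = 0 ∨
    (if ai > bi then (1:Int) else if bi > ai then 2 else 0) = 1 ∨
    (if ai > bi then (1:Int) else if bi > ai then 2 else 0) = 2 := by
  split_ifs <;> simp

-- A's fused loop, over any list of indices, computes pvCountB of the classified states
theorem pvAFold (a b : List Int) (idx : List Int) : ∀ (sc top : Int),
    (top = 0 ∨ top = 1 ∨ top = 2) →
    (idx.foldl (fun st i =>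
        let ai := PySem.List.pyGetD a i 0
        let bi := PySem.List.pyGetD b i 0
        if st.2 = 1 ∧ ai ≤ bi then (st.1 + 1, set_top ai bi)
        else if st.2 = 2 ∧ ai ≥ bi then (st.1 + 1, set_top ai bi)
        else if st.2 = 0 ∧ ai ≠ bi then (st.1 + 1, set_top ai bi)
        else st) (sc, top)).1
      = sc + pvCountB top (idx.map (fun i =>
          let ai := PySem.List.pyGetD a i 0
          let bi := PySem.List.pyGetD b i 0
          if ai > bi then 1 else if bi > ai then 2 else 0)) := by
  induction idx with
  | nil => intro sc top _; simp [pvCountB]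
  | cons i t ih =>
    intro sc top htop
    simp only [List.foldl_cons, List.map_cons, pvCountB]
    rw [pvStep _ _ _ _ htop]
    by_cases h : (if PySem.List.pyGetD a i 0 > PySem.List.pyGetD b i 0 then (1:Int)
                  else if PySem.List.pyGetD b i 0 > PySem.List.pyGetD a i 0 then 2 else 0) = top
    · rw [if_neg (by simp [h]), if_neg (by simp [h]), ih sc top htop, h]
      ring
    · rw [if_pos h, if_pos h, ih (sc + 1) _ (pvClassifyMem _ _)]
      ring

-- ===== VERDICT (by name: the statement is the Claim_ definition above) =====
theorem count_switch_top_spec : Claim_equal_count_switch_top := by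
  intro a b _ _
  unfold Spec_count_switch_top count_switch_top count_switch_top_alt
  rw [pvAFold a b _ 0 0 (Or.inl rfl)]
  set f : Int → Int := fun i =>
      let ai := PySem.List.pyGetD a i 0
      let bi := PySem.List.pyGetD b i 0
      if ai > bi then (1:Int) else if bi > ai then 2 else 0 with hf
  have hlen : ((PySem.List.pyRange 0 ((a.length : Nat) : Int) 1).map f).length = a.length := by
    simp [PySem.List.pyRange_zero_natCast]
  have hs := pvSwitches_eq_seg
      (0 :: (PySem.List.pyRange 0 ((a.length : Nat) : Int) 1).map f) a.length 0
  simp only [Nat.zero_add] at hs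
  rw [hs]
  have hcb := pvSeg_eq_countB ((PySem.List.pyRange 0 ((a.length : Nat) : Int) 1).map f) [] 0
  simp only [List.nil_append, List.length_nil] at hcb
  rw [hlen] at hcb
  rw [hcb]
  ring
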